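-- pv_equiv track=rewrite | github.com/tjresearch/research-oliver-hayman | Main.py | matBumperDown
-- ===== SOURCE A (Python) =====
-- def matBumperDown(x):
--   ret = []
--   for i in range(len(x)):
--     ret.append(x[i][:])
--   for k in range(len(x)):
--     prev = 0
--     current = 0
--     count = 0
--     for i in range(len(x[0])):
--       prev = current
--       current = x[k][i]
--       ret[k][i] = 0
--       if current != 0 and prev != 0:
--           count += 1
--       elif current == 0 and prev != 0:
--           for j in range(count):
--             ret[k][i-1-j] = count - j
--           count = 0
--       elif current != 0 and prev == 0:
--           count += 1
--     if current != 0: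
--       for j in range(count):
--           ret[k][len(ret[0])-1-j] = count - j
--   return ret
-- ===== SOURCE B (Python) =====
-- def matBumperDown(x):
--   # One forward pass per row with a running counter: a nonzero cell becomes the
--   # length of the nonzero run so far, a zero resets the counter.
--   ret = [row[:] for row in x]
--   for k in range(len(x)):
--     count = 0
--     for i in range(len(x[0])):
--       if ret[k][i] != 0:
--         count += 1
--         ret[k][i] = count
--       else:
--         count = 0
--   return ret
-- ===== Notes on version B (the rewrite author's own statement) =====
-- stated objective: simpler
-- what changed: Replaces A's two-phase zero-then-backfill logic (zero each cell, detect run ends, loop backwards rewriting the run, plus a separate tail loop after each row) with a single forward pass per row keeping a running counter that writes each run value directly; each cell is written once instead of twice.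
import Mathlib
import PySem

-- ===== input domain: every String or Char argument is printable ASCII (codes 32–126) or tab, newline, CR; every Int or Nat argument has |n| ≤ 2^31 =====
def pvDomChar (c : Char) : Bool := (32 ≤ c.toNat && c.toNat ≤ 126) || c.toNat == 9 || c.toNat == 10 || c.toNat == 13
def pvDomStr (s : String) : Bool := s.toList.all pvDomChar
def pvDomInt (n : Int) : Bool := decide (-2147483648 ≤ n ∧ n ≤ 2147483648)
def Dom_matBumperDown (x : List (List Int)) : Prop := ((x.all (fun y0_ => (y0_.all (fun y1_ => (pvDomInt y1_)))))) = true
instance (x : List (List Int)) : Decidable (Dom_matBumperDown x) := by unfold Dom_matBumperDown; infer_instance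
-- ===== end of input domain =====

-- B replaces A's zero-then-backfill run rewriting (plus its after-loop tail fill) with a
-- single forward pass per row keeping a running counter: objective 'simpler'.
-- A mutates only its local copy `ret`, so return-value equivalence is full equivalence.

-- ===== PORT A =====
-- ret[k][i] = v for an in-range Python index (negative = from the end); out-of-range
-- writes (Python IndexError) are excluded by Pre_matBumperDown.
def pySet (l : List Int) (i v : Int) : List Int :=
  if 0 ≤ i then l.set i.toNat v else l.set (l.length - (-i).toNat) v

-- the inner 'for j in range(count): ret[k][i-1-j] = count - j'
def fillA (r : List Int) (i cnt : Int) : List Int :=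
  (PySem.List.pyRange 0 cnt 1).foldl (fun r j => pySet r (i - 1 - j) (cnt - j)) r

-- one iteration of A's 'for i in range(len(x[0]))' body; state = (ret row, current, count),
-- 'prev = current' is the first line of the body
def stepA (row : List Int) (st : List Int × Int × Int) (i : Int) : List Int × Int × Int :=
  let prev := st.2.1
  let count := st.2.2
  let current := PySem.List.pyGetD row i 0
  let ret := pySet st.1 i 0
  if current ≠ 0 ∧ prev ≠ 0 then (ret, current, count + 1)
  else if current = 0 ∧ prev ≠ 0 then (fillA ret i count, current, 0)
  else if current ≠ 0 ∧ prev = 0 then (ret, current, count + 1)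
  else (ret, current, count)

-- A's body for row k (rows are independent: each starts from the copy x[k][:] and only
-- writes ret[k]); n = len(x[0]) = len(ret[0]) throughout
def rowA (n : Nat) (row : List Int) : List Int :=
  let st := (PySem.List.pyRange 0 (n : Int) 1).foldl (stepA row) (row, 0, 0)
  if st.2.1 ≠ 0 then fillA st.1 (n : Int) st.2.2 else st.1

def matBumperDown (x : List (List Int)) : List (List Int) :=
  x.map (fun row => rowA (x.headD []).length row)

-- ===== PORT B =====
-- one iteration of B's loop body; state = (ret row, count)
def stepB (st : List Int × Int) (i : Nat) : List Int × Int :=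
  if st.1.getD i 0 ≠ 0 then (st.1.set i (st.2 + 1), st.2 + 1) else (st.1, 0)

def rowB (n : Nat) (row : List Int) : List Int :=
  ((List.range n).foldl stepB (row, 0)).1

def matBumperDown_alt (x : List (List Int)) : List (List Int) :=
  x.map (fun row => rowB (x.headD []).length row)

-- ===== PRECONDITION & SPEC =====
-- A indexes every row up to len(x[0]); on a row shorter than the first row it raises
-- IndexError (B raises identically), so exactly those inputs are excluded.
def Pre_matBumperDown (x : List (List Int)) : Prop :=
  ∀ row ∈ x, (x.headD []).length ≤ row.length
instance (x : List (List Int)) : Decidable (Pre_matBumperDown x) := by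
  unfold Pre_matBumperDown; infer_instance
def pvWitness_matBumperDown : List (List Int) := [[1, 0, 2], [0, 3, 4]]
def Spec_matBumperDown (x : List (List Int)) (out : List (List Int)) : Prop := out = matBumperDown_alt x
instance (x : List (List Int)) (out : List (List Int)) : Decidable (Spec_matBumperDown x out) := by unfold Spec_matBumperDown; infer_instance

-- ===== CLAIM (what is proved, stated in full; the proofs are below) =====
def Claim_equal_matBumperDown : Prop := ∀ (x : List (List Int)), Dom_matBumperDown x → Pre_matBumperDown x → Spec_matBumperDown x (matBumperDown x)

-- ===== LEMMAS AND PROOFS =====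

theorem pySet_natCast (l : List Int) (i : Nat) (v : Int) :
    pySet l (i : Int) v = l.set i v := by
  simp [pySet]

theorem length_pySet (l : List Int) (i v : Int) : (pySet l i v).length = l.length := by
  unfold pySet; split <;> simp

-- pointwise effect of the first m writes of fillA (positions i-1, …, i-m get cnt, …, cnt-m+1)
theorem length_fillUp (r : List Int) (iN : Nat) (cnt : Int) (m : Nat) :
    ((PySem.List.pyRange 0 (m : Int) 1).foldl
        (fun r jj => pySet r ((iN : Int) - 1 - jj) (cnt - jj)) r).length = r.length := by
  induction m with
  | zero => simp
  | succ m ih =>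
      rw [show ((m + 1 : Nat) : Int) = (m : Int) + 1 by push_cast; ring,
        PySem.List.pyRange_one_succ_right (by positivity), List.foldl_append]
      simp [length_pySet, ih]

theorem fillUp_getElem? (r : List Int) (iN : Nat) (cnt : Int) (m : Nat) (hm : (m : Int) ≤ cnt) (hle : m ≤ iN) (hr : iN ≤ r.length) (j : Nat) :
    ((PySem.List.pyRange 0 (m : Int) 1).foldl
        (fun r jj => pySet r ((iN : Int) - 1 - jj) (cnt - jj)) r)[j]? =
      if iN ≤ j + m ∧ j < iN then some (cnt - ((iN : Int) - 1 - (j : Int))) else r[j]? := by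
  induction m with
  | zero => simp
  | succ m ih =>
      rw [show ((m + 1 : Nat) : Int) = (m : Int) + 1 by push_cast; ring,
        PySem.List.pyRange_one_succ_right (by positivity), List.foldl_append]
      simp only [List.foldl_cons, List.foldl_nil]
      have hidx : ((iN : Int) - 1 - (m : Int)) = ((iN - 1 - m : Nat) : Int) := by omega
      rw [hidx, pySet_natCast, List.getElem?_set, length_fillUp, ih (by omega) (by omega)]
      split_ifs <;> first | rfl | (exfalso; omega) | (simp only [Option.some.injEq]; omega)

-- A's state after i iterations (indices taken from List.range via pyRange_zero_nat)
def stA (row : List Int) (i : Nat) : List Int × Int × Int :=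
  (List.range i).foldl (fun st (j : Nat) => stepA row st (j : Int)) (row, 0, 0)

def stB (row : List Int) (i : Nat) : List Int × Int :=
  (List.range i).foldl stepB (row, 0)

-- the loop invariant tying A's state to B's after i iterations
def BumpInv (row : List Int) (i : Nat) : Prop :=
  (stA row i).2.2 = (stB row i).2 ∧
  0 ≤ (stA row i).2.2 ∧ (stA row i).2.2.toNat ≤ i ∧
  (stA row i).2.1 = (if i = 0 then 0 else row.getD (i - 1) 0) ∧
  ((stA row i).2.1 ≠ 0 ↔ 0 < (stA row i).2.2) ∧
  (stA row i).1.length = row.length ∧ (stB row i).1.length = row.length ∧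
  (∀ j : Nat, j + (stA row i).2.2.toNat < i ∨ i ≤ j → (stA row i).1[j]? = (stB row i).1[j]?) ∧
  (∀ j : Nat, i ≤ j + (stA row i).2.2.toNat → j < i → (stA row i).1[j]? = some 0) ∧
  (∀ t : Nat, t < (stA row i).2.2.toNat → (stB row i).1[i - 1 - t]? = some ((stA row i).2.2 - t)) ∧
  (∀ j : Nat, i ≤ j → (stB row i).1[j]? = row[j]?)

theorem bumpInv_zero (row : List Int) : BumpInv row 0 := by
  unfold BumpInv stA stB
  simp

theorem bumpInv_step (row : List Int) (n i : Nat) (hn : n ≤ row.length) (hi : i < n)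
    (h : BumpInv row i) : BumpInv row (i + 1) := by
  have hstA : stA row (i + 1) = stepA row (stA row i) (i : Int) := by
    unfold stA; rw [List.range_succ, List.foldl_append]; rfl
  have hstB : stB row (i + 1) = stepB (stB row i) i := by
    unfold stB; rw [List.range_succ, List.foldl_append]; rfl
  unfold BumpInv at h ⊢
  obtain ⟨h1, h2, h3, h4, h5, h6, h7, h8, h9, h10, h11⟩ := h
  have hil : i < row.length := lt_of_lt_of_le hi hn
  have hrowi : row[i]? = some (row.getD i 0) := by
    rw [List.getD_eq_getElem?_getD, List.getElem?_eq_getElem hil]; rfl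
  have hgetb : (stB row i).1.getD i 0 = row.getD i 0 := by
    rw [List.getD_eq_getElem?_getD, h11 i le_rfl, ← List.getD_eq_getElem?_getD]
  rw [hstA, hstB]
  simp only [stepA, stepB, PySem.List.pyGetD_natCast, pySet_natCast, hgetb]
  by_cases hc : row.getD i 0 = 0
  · -- current = 0; B leaves its state, count resets to 0 (or stays 0)
    by_cases hp : (stA row i).2.1 = 0
    · -- prev = 0 too: A only zeroes cell i (it is already 0 in both)
      have hcnt : (stA row i).2.2 = 0 := by
        by_contra hne
        exact (h5.mpr (lt_of_le_of_ne h2 (Ne.symm hne))) hp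
      rw [if_neg (fun h => h.1 hc), if_neg (fun h => h.2 hp),
        if_neg (fun h => h.1 hc), if_neg (fun h => h hc)]
      dsimp only
      refine ⟨by rw [hcnt], h2, by omega, by simp,
        by rw [hcnt]; exact ⟨fun h => absurd hc h, fun h => absurd h (by omega)⟩,
        by simp [h6], h7, ?_, ?_, ?_, ?_⟩
      · intro j _
        rcases eq_or_ne j i with rfl | hji
        · rw [List.getElem?_set_self (by omega), h11 j le_rfl, hrowi, hc]
        · rw [List.getElem?_set_ne (by omega)]
          exact h8 j (by omega)
      · intro j hj1 hj2; omega
      · intro t ht; omega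
      · intro j hj; exact h11 j (by omega)
    · -- prev ≠ 0: a run just ended; A backfills it with exactly B's values
      have hcnt : 0 < (stA row i).2.2 := h5.mp hp
      rw [if_neg (fun h => h.1 hc), if_pos ⟨hc, hp⟩, if_neg (fun h => h hc)]
      dsimp only
      have hcc : (stA row i).2.2 = (((stA row i).2.2.toNat : Nat) : Int) :=
        (Int.toNat_of_nonneg h2).symm
      have hfill : ∀ j : Nat,
          (fillA ((stA row i).1.set i 0) (i : Int) (stA row i).2.2)[j]? =
            if i ≤ j + (stA row i).2.2.toNat ∧ j < i then
              some ((((stA row i).2.2.toNat : Nat) : Int) - ((i : Int) - 1 - (j : Int)))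
            else ((stA row i).1.set i 0)[j]? := by
        intro j
        unfold fillA
        rw [hcc]
        exact fillUp_getElem? _ i _ _ (le_refl _) h3 (by simp [h6]; omega) j
      have hlenfill : (fillA ((stA row i).1.set i 0) (i : Int) (stA row i).2.2).length
          = row.length := by
        unfold fillA; rw [hcc]; rw [length_fillUp]; simp [h6]
      refine ⟨rfl, le_rfl, by omega, by simp,
        ⟨fun h => absurd hc h, fun h => absurd h (by omega)⟩,
        by simp [hlenfill], h7, ?_, ?_, ?_, ?_⟩
      · intro j _
        rw [hfill j]
        by_cases hreg : i ≤ j + (stA row i).2.2.toNat ∧ j < i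
        · rw [if_pos hreg]
          have ht : i - 1 - j < (stA row i).2.2.toNat := by omega
          have := h10 (i - 1 - j) ht
          rw [show i - 1 - (i - 1 - j) = j by omega] at this
          rw [this]
          simp only [Option.some.injEq]
          omega
        · rw [if_neg hreg]
          rcases eq_or_ne j i with rfl | hji
          · rw [List.getElem?_set_self (by omega), h11 j le_rfl, hrowi, hc]
          · rw [List.getElem?_set_ne (by omega)]
            exact h8 j (by omega)
      · intro j hj1 hj2; omega
      · intro t ht; omega
      · intro j hj; exact h11 j (by omega)
  · -- current ≠ 0: both extend the run; B also writes the new count at cell i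
    have hbranch :
        (if row.getD i 0 ≠ 0 ∧ (stA row i).2.1 ≠ 0 then
            ((stA row i).1.set i 0, row.getD i 0, (stA row i).2.2 + 1)
          else if row.getD i 0 = 0 ∧ (stA row i).2.1 ≠ 0 then
            (fillA ((stA row i).1.set i 0) (i : Int) (stA row i).2.2, row.getD i 0, 0)
          else if row.getD i 0 ≠ 0 ∧ (stA row i).2.1 = 0 then
            ((stA row i).1.set i 0, row.getD i 0, (stA row i).2.2 + 1)
          else ((stA row i).1.set i 0, row.getD i 0, (stA row i).2.2)) =
          ((stA row i).1.set i 0, row.getD i 0, (stA row i).2.2 + 1) := by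
      by_cases hp : (stA row i).2.1 = 0
      · rw [if_neg (fun h => h.2 hp), if_neg (fun h => hc h.1), if_pos ⟨hc, hp⟩]
      · rw [if_pos ⟨hc, hp⟩]
    have hcb : (stA row i).2.2 = (stB row i).2 := h1
    rw [hbranch, if_pos hc]
    dsimp only
    have hcnt0 : 0 ≤ (stA row i).2.2 := h2
    refine ⟨by rw [h1], by omega, by omega, by simp,
      ⟨fun _ => by omega, fun _ => hc⟩, by simp [h6], by simp [h7], ?_, ?_, ?_, ?_⟩
    · intro j hj
      rw [List.getElem?_set_ne (by omega), List.getElem?_set_ne (by omega)]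
      exact h8 j (by omega)
    · intro j hj1 hj2
      rcases eq_or_ne j i with rfl | hji
      · rw [List.getElem?_set_self (by omega)]
      · rw [List.getElem?_set_ne (by omega)]
        exact h9 j (by omega) (by omega)
    · intro t ht
      rcases Nat.eq_zero_or_pos t with rfl | htpos
      · rw [show i + 1 - 1 - 0 = i by omega, List.getElem?_set_self (by omega)]
        simp [h1]
      · rw [show i + 1 - 1 - t = i - t by omega, List.getElem?_set_ne (by omega)]
        have := h10 (t - 1) (by omega)
        rw [show i - 1 - (t - 1) = i - t by omega] at this
        rw [this]
        simp only [Option.some.injEq]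
        omega
    · intro j hj
      rw [List.getElem?_set_ne (by omega)]
      exact h11 j (by omega)

theorem rowA_eq_rowB (n : Nat) (row : List Int) (hn : n ≤ row.length) :
    rowA n row = rowB n row := by
  have key : ∀ i, i ≤ n → BumpInv row i := by
    intro i
    induction i with
    | zero => exact fun _ => bumpInv_zero row
    | succ k ih => exact fun hk => bumpInv_step row n k hn (by omega) (ih (by omega))
  obtain ⟨h1, h2, h3, h4, h5, h6, h7, h8, h9, h10, h11⟩ :
      BumpInv row n := key n le_rfl
  unfold rowA rowB
  have hA : (PySem.List.pyRange 0 (n : Int) 1).foldl (stepA row) (row, 0, 0) = stA row n := by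
    rw [show PySem.List.pyRange 0 (n : Int) 1 = (List.range n).map Int.ofNat by
      simpa using PySem.List.pyRange_zero_nat n, List.foldl_map]
    rfl
  have hB : List.foldl stepB (row, 0) (List.range n) = stB row n := rfl
  rw [hA, hB]
  by_cases hcur : (stA row n).2.1 = 0
  · have hcnt : (stA row n).2.2 = 0 := by
      by_contra hne
      exact (h5.mpr (lt_of_le_of_ne h2 (Ne.symm hne))) hcur
    rw [if_neg (fun h => h hcur)]
    exact List.ext_getElem? fun j => h8 j (by omega)
  · have hcnt : 0 < (stA row n).2.2 := h5.mp hcur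
    rw [if_pos hcur]
    have hcc : (stA row n).2.2 = (((stA row n).2.2.toNat : Nat) : Int) :=
      (Int.toNat_of_nonneg h2).symm
    refine List.ext_getElem? fun j => ?_
    have hfj : (fillA (stA row n).1 (n : Int) (stA row n).2.2)[j]? =
        if n ≤ j + (stA row n).2.2.toNat ∧ j < n then
          some ((((stA row n).2.2.toNat : Nat) : Int) - ((n : Int) - 1 - (j : Int)))
        else (stA row n).1[j]? := by
      unfold fillA
      rw [hcc]
      exact fillUp_getElem? _ n _ _ (le_refl _) h3 (by omega) j
    rw [hfj]
    by_cases hreg : n ≤ j + (stA row n).2.2.toNat ∧ j < n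
    · rw [if_pos hreg]
      have ht : n - 1 - j < (stA row n).2.2.toNat := by omega
      have := h10 (n - 1 - j) ht
      rw [show n - 1 - (n - 1 - j) = j by omega] at this
      rw [this]
      simp only [Option.some.injEq]
      omega
    · rw [if_neg hreg]
      exact h8 j (by omega)

-- ===== VERDICT (by name: the statement is the Claim_ definition above) =====
theorem matBumperDown_spec : Claim_equal_matBumperDown := by
  intro x _ hpre
  unfold Spec_matBumperDown matBumperDown matBumperDown_alt
  exact List.map_congr_left (fun row hrow => rowA_eq_rowB _ row (hpre row hrow))
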